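-- pv_equiv track=rewrite | github.com/AlinMH/C-Projects | belief-propagation/graph_utils.py | create_graph_of_cliques
-- ===== SOURCE A (Python) =====
-- def create_graph_of_cliques(maximal_cliques):
--     C = []
--
--     for c1 in maximal_cliques:
--         for c2 in maximal_cliques:
--             if c1 != c2:
--                 n_intersetions = len(set(c1).intersection(set(c2)))
--
--                 if n_intersetions > 0:
--                     C.append((c1, c2, n_intersetions))
--
--     C.sort(key=lambda c: c[2], reverse=True)
--     return C
-- ===== SOURCE B (Python) =====
-- def create_graph_of_cliques(maximal_cliques):
--     sets = [set(c) for c in maximal_cliques]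
--
--     # inverted index: element -> ordered list of clique indices containing it
--     index = {}
--     for i, s in enumerate(sets):
--         for e in s:
--             index.setdefault(e, []).append(i)
--
--     # pair intersection sizes accumulated from co-occurrence lists
--     counts = {}
--     for occ in index.values():
--         for a in occ:
--             for b in occ:
--                 if b != a:
--                     counts[(a, b)] = counts.get((a, b), 0) + 1
--
--     C = []
--     for i, c1 in enumerate(maximal_cliques):
--         for j, c2 in enumerate(maximal_cliques):
--             if c1 != c2:
--                 cnt = counts.get((i, j), 0)
--                 if cnt > 0:
--                     C.append((c1, c2, cnt))
--
--     C.sort(key=lambda c: c[2], reverse=True)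
--     return C
-- ===== Notes on version B (the rewrite author's own statement) =====
-- stated objective: faster
-- what changed: Instead of computing a set intersection for every ordered pair of cliques (O(n^2) intersections), B builds an inverted element-to-clique-indices index once and accumulates every pair's intersection size from the co-occurrence lists, then emits pairs in the same nested order and sorts identically.
import Mathlib
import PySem

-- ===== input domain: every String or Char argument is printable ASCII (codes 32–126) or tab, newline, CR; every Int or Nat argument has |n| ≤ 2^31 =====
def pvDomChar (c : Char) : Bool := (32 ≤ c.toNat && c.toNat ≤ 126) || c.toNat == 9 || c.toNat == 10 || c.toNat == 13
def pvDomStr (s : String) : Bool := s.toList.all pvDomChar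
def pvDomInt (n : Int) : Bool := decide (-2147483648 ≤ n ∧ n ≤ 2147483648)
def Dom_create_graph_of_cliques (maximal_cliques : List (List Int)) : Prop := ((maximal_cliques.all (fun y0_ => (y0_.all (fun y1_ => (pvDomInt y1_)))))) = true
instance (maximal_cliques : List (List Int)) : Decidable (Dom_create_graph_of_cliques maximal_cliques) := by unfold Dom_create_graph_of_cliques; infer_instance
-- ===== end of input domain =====

-- B replaces A's per-pair set intersections by an inverted element→clique-indices index whose
-- co-occurrence lists accumulate all pair intersection sizes at once (objective: faster on sparsely
-- overlapping cliques; equal return value proved below).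

-- ===== PORT A =====
def create_graph_of_cliques (maximal_cliques : List (List Int)) : List (List Int × List Int × Int) :=
  let C : List (List Int × List Int × Int) :=
    maximal_cliques.foldl (fun C c1 =>
      maximal_cliques.foldl (fun C c2 =>
        if c1 ≠ c2 then
          let n_intersetions := PySem.Set.len (PySem.Set.inter (PySem.Set.ofList c1) (PySem.Set.ofList c2))
          if n_intersetions > 0 then C ++ [(c1, c2, n_intersetions)] else C
        else C) C) []
  PySem.List.sorted C (fun c => c.2.2) true

-- ===== PORT B =====
-- B's pipeline stages (named helpers; Source B computes them in sequence in one function body)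
def pvAltSets (maximal_cliques : List (List Int)) : List (PySem.Set Int) :=
  maximal_cliques.map (fun c => PySem.Set.ofList c)

def pvAltIndex (sets : List (PySem.Set Int)) : PySem.Dict Int (List Int) :=
  (PySem.List.enumerate sets).foldl (fun d p =>
    p.2.foldl (fun d e => d.modify e [] (fun l => l ++ [p.1])) d) PySem.Dict.empty

def pvAltCounts (index : PySem.Dict Int (List Int)) : PySem.Dict (Int × Int) Int :=
  index.values.foldl (fun d occ =>
    occ.foldl (fun d a =>
      occ.foldl (fun d b =>
        if b ≠ a then d.modify (a, b) 0 (fun x => x + 1) else d) d) d) PySem.Dict.empty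

def pvAltEmit (maximal_cliques : List (List Int)) (counts : PySem.Dict (Int × Int) Int) :
    List (List Int × List Int × Int) :=
  (PySem.List.enumerate maximal_cliques).foldl (fun C p1 =>
    (PySem.List.enumerate maximal_cliques).foldl (fun C p2 =>
      if p1.2 ≠ p2.2 then
        let cnt := counts.getD (p1.1, p2.1) 0
        if cnt > 0 then C ++ [(p1.2, p2.2, cnt)] else C
      else C) C) []

def create_graph_of_cliques_alt (maximal_cliques : List (List Int)) : List (List Int × List Int × Int) :=
  let C := pvAltEmit maximal_cliques (pvAltCounts (pvAltIndex (pvAltSets maximal_cliques)))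
  PySem.List.sorted C (fun c => c.2.2) true

-- ===== PRECONDITION & SPEC =====
def Spec_create_graph_of_cliques (maximal_cliques : List (List Int)) (out : List (List Int × List Int × Int)) : Prop := out = create_graph_of_cliques_alt maximal_cliques
instance (maximal_cliques : List (List Int)) (out : List (List Int × List Int × Int)) : Decidable (Spec_create_graph_of_cliques maximal_cliques out) := by unfold Spec_create_graph_of_cliques; infer_instance

-- ===== CLAIM (what is proved, stated in full; the proofs are below) =====
def Claim_equal_create_graph_of_cliques : Prop := ∀ (maximal_cliques : List (List Int)), Dom_create_graph_of_cliques maximal_cliques → Spec_create_graph_of_cliques maximal_cliques (create_graph_of_cliques maximal_cliques)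

-- ===== LEMMAS AND PROOFS =====

-- the flat (element, clique-index) pair list B's index loop walks over
def pvBig (sets : List (PySem.Set Int)) : List (Int × Int) :=
  (PySem.List.enumerate sets).flatMap (fun p => p.2.map (fun e => (e, p.1)))

-- the co-occurrence list of element e: the clique indices whose set contains e
def pvOcc (maximal_cliques : List (List Int)) (e : Int) : List Int :=
  ((PySem.List.enumerate (pvAltSets maximal_cliques)).filter (fun p => p.2.contains e)).map (fun p => p.1)

-- A's branch bodies, as flatMap kernels
def pvFA (c1 c2 : List Int) : List (List Int × List Int × Int) :=
  if c1 ≠ c2 then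
    (if PySem.Set.len (PySem.Set.inter (PySem.Set.ofList c1) (PySem.Set.ofList c2)) > 0 then
      [(c1, c2, PySem.Set.len (PySem.Set.inter (PySem.Set.ofList c1) (PySem.Set.ofList c2)))] else [])
  else []

def pvFB (mc : List (List Int)) (p1 p2 : Int × List Int) : List (List Int × List Int × Int) :=
  if p1.2 ≠ p2.2 then
    (if (pvAltCounts (pvAltIndex (pvAltSets mc))).getD (p1.1, p2.1) 0 > 0 then
      [(p1.2, p2.2, (pvAltCounts (pvAltIndex (pvAltSets mc))).getD (p1.1, p2.1) 0)] else [])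
  else []

lemma pv_fold_flat {γ β δ : Type} (L : List γ) (g : γ → List β) (step : δ → β → δ) :
    ∀ d : δ, (L.flatMap g).foldl step d = L.foldl (fun d p => (g p).foldl step d) d := by
  induction L with
  | nil => intro d; rfl
  | cons x xs ih =>
    intro d
    simp only [List.flatMap_cons, List.foldl_append, List.foldl_cons]
    exact ih _

lemma pv_filter_beq_of_nodup (l : List Int) (e : Int) (h : l.Nodup) :
    l.filter (fun x => x == e) = if e ∈ l then [e] else [] := by
  induction l with
  | nil => simp
  | cons a t ih =>
    rw [List.nodup_cons] at h
    by_cases hae : a = e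
    · subst hae
      have ht : t.filter (fun x => x == a) = [] := by
        rw [ih h.2]; simp [h.1]
      simp [ht]
    · simp [hae, ih h.2, Ne.symm hae]

lemma pv_flatMap_if_singleton {α β : Type} (l : List α) (p : α → Bool) (g : α → β) :
    l.flatMap (fun x => if p x then [g x] else []) = (l.filter p).map g := by
  induction l with
  | nil => rfl
  | cons x xs ih =>
    by_cases h : p x <;> simp [List.flatMap_cons, h, ih]

lemma pv_flatMap_enum {β : Type} (l : List (List Int)) (F : List Int → List β) :
    l.flatMap F = (PySem.List.enumerate l).flatMap (fun p => F p.2) := by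
  conv_lhs => rw [← PySem.List.map_snd_enumerate l 0]
  rw [List.flatMap_map]

-- the index dict is the single fold over pvBig
lemma pv_index_eq_fold (sets : List (PySem.Set Int)) :
    pvAltIndex sets = (pvBig sets).foldl (fun d q => d.modify q.1 [] (fun l => l ++ [q.2])) PySem.Dict.empty := by
  unfold pvAltIndex pvBig
  rw [pv_fold_flat]
  simp only [List.foldl_map]

lemma pv_index_getD (mc : List (List Int)) (e : Int) :
    (pvAltIndex (pvAltSets mc)).getD e [] = pvOcc mc e := by
  rw [pv_index_eq_fold, PySem.Dict.getD_foldl_modify_append, PySem.Dict.getD_empty, List.nil_append]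
  unfold pvBig pvOcc
  rw [List.filter_flatMap, List.map_flatMap]
  have hstep : ∀ p ∈ PySem.List.enumerate (pvAltSets mc) 0,
      ((p.2.map (fun e' => (e', p.1))).filter (fun q => q.1 == e)).map (fun q => q.2)
        = if p.2.contains e then [p.1] else [] := by
    intro p hp
    have hnd : p.2.Nodup := by
      rcases (PySem.List.mem_enumerate_iff _ _ _).1 hp with ⟨k, hk, rfl⟩
      simp only [pvAltSets] at hk ⊢
      simp only [List.getElem_map]
      exact PySem.Set.nodup_ofList _
    rw [List.filter_map]
    have hcomp : ((fun q => q.1 == e) ∘ (fun e' => ((e' : Int), p.1))) = fun e' => e' == e := rfl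
    rw [hcomp, pv_filter_beq_of_nodup _ _ hnd]
    by_cases he : e ∈ p.2
    · simp [he]
    · simp [he]
  rw [List.flatMap_congr hstep, pv_flatMap_if_singleton]

lemma pv_occ_nodup (mc : List (List Int)) (e : Int) : (pvOcc mc e).Nodup := by
  unfold pvOcc
  have h := (PySem.List.pairwise_lt_enumerate (pvAltSets mc) 0).filter (fun p => p.2.contains e)
  have h2 := h.map (fun p : Int × PySem.Set Int => p.1) (S := fun a b : Int => a < b) (fun a b hab => hab)
  exact h2.imp (fun hab => ne_of_lt hab)

lemma pv_mem_occ (mc : List (List Int)) (e : Int) (k : Nat) (hk : k < mc.length) :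
    ((k : Int) ∈ pvOcc mc e) ↔ e ∈ PySem.Set.ofList mc[k] := by
  unfold pvOcc
  rw [List.mem_map]
  constructor
  · rintro ⟨p, hp, hfst⟩
    rw [List.mem_filter] at hp
    rcases (PySem.List.mem_enumerate_iff _ _ _).1 hp.1 with ⟨k', hk', hpe⟩
    subst hpe
    have hc := List.contains_iff_mem.1 hp.2
    have hkk : k' = k := by simpa using hfst
    subst hkk
    simpa [pvAltSets] using hc
  · intro he
    have hk2 : k < (pvAltSets mc).length := by simpa [pvAltSets] using hk
    refine ⟨(0 + (k : Int), (pvAltSets mc)[k]), ?_, by simp⟩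
    rw [List.mem_filter]
    refine ⟨(PySem.List.mem_enumerate_iff _ _ _).2 ⟨k, hk2, rfl⟩, ?_⟩
    exact List.contains_iff_mem.2 (by simpa [pvAltSets] using he)

lemma pv_index_keys_nodup (mc : List (List Int)) : (pvAltIndex (pvAltSets mc)).keys.Nodup := by
  rw [pv_index_eq_fold]
  exact PySem.Dict.nodup_keys_foldl_modify_key (pvBig (pvAltSets mc)) (fun q => q.1) []
    (fun _ q l => l ++ [q.2]) PySem.Dict.empty (by simp [PySem.Dict.keys_empty])

lemma pv_mem_index_keys (mc : List (List Int)) (e : Int) :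
    e ∈ (pvAltIndex (pvAltSets mc)).keys ↔ ∃ k, ∃ _ : k < mc.length, e ∈ PySem.Set.ofList mc[k] := by
  rw [pv_index_eq_fold]
  rw [PySem.Dict.keys_foldl_modify_key (pvBig (pvAltSets mc)) (fun q => q.1) []
    (fun _ q l => l ++ [q.2]) PySem.Dict.empty]
  rw [PySem.Dict.keys_empty, PySem.Set.update_nil_left, PySem.Set.mem_ofList]
  unfold pvBig
  rw [List.mem_map]
  constructor
  · rintro ⟨q, hq, hq1⟩
    rw [List.mem_flatMap] at hq
    rcases hq with ⟨p, hpE, hqm⟩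
    rcases (PySem.List.mem_enumerate_iff _ _ _).1 hpE with ⟨k, hk, hpe⟩
    subst hpe
    rcases List.mem_map.1 hqm with ⟨e', he', hq2⟩
    subst hq2
    have he'e : e' = e := hq1
    subst he'e
    refine ⟨k, by simpa [pvAltSets] using hk, ?_⟩
    simpa [pvAltSets] using he'
  · rintro ⟨k, hk, he⟩
    have hk2 : k < (pvAltSets mc).length := by simpa [pvAltSets] using hk
    refine ⟨(e, (0 + (k : Int), (pvAltSets mc)[k]).1), ?_, rfl⟩
    rw [List.mem_flatMap]
    refine ⟨(0 + (k : Int), (pvAltSets mc)[k]), (PySem.List.mem_enumerate_iff _ _ _).2 ⟨k, hk2, rfl⟩, ?_⟩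
    exact List.mem_map.2 ⟨e, by simpa [pvAltSets] using he, rfl⟩

-- the counts dict is the counter of the flat pair list
lemma pv_counts_getD (index : PySem.Dict Int (List Int)) (x : Int × Int) :
    (pvAltCounts index).getD x 0 =
      ((index.values.flatMap (fun occ => occ.flatMap (fun a => (occ.filter (fun b => b ≠ a)).map (fun b => (a, b))))).count x : Int) := by
  unfold pvAltCounts
  have h1 : ∀ (occ : List Int) (d : PySem.Dict (Int × Int) Int),
      occ.foldl (fun d a => occ.foldl (fun d b => if b ≠ a then d.modify (a, b) (0 : Int) (fun x => x + 1) else d) d) d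
        = (occ.flatMap (fun a => (occ.filter (fun b => b ≠ a)).map (fun b => (a, b)))).foldl
            (fun d q => d.modify q 0 (fun x => x + 1)) d := by
    intro occ d
    rw [pv_fold_flat]
    refine PySem.List.foldl_congr_mem _ _ _ _ ?_
    intro acc a _
    rw [List.foldl_map, List.foldl_filter]
    refine PySem.List.foldl_congr_mem _ _ _ _ ?_
    intro acc' b _
    by_cases hb : b = a <;> simp [hb]
  have h2 : (index.values.foldl (fun d occ =>
      occ.foldl (fun d a => occ.foldl (fun d b => if b ≠ a then d.modify (a, b) (0 : Int) (fun x => x + 1) else d) d) d)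
      (PySem.Dict.empty : PySem.Dict (Int × Int) Int))
      = ((index.values.flatMap (fun occ => occ.flatMap (fun a => (occ.filter (fun b => b ≠ a)).map (fun b => (a, b))))).foldl
          (fun d q => d.modify q 0 (fun x => x + 1)) PySem.Dict.empty) := by
    rw [pv_fold_flat]
    refine PySem.List.foldl_congr_mem _ _ _ _ ?_
    intro acc occ _
    exact h1 occ acc
  rw [h2, PySem.Dict.getD_foldl_modify_add_one, PySem.Dict.getD_empty, zero_add]

lemma pv_count_pair_map (l : List Int) (a i j : Int) :
    ((l.map (fun b => (a, b))).count (i, j)) = if a = i then l.count j else 0 := by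
  induction l with
  | nil => simp
  | cons x xs ih =>
    simp only [List.map_cons, List.count_cons, ih]
    by_cases hai : a = i
    · subst hai
      by_cases hxj : x = j <;> simp [hxj, Prod.ext_iff]
    · simp [hai, Prod.ext_iff]

lemma pv_sum_ite_count (l : List Int) (i : Int) (c : Nat) :
    (l.map (fun a => if a = i then c else 0)).sum = c * l.count i := by
  induction l with
  | nil => simp
  | cons x xs ih =>
    simp only [List.map_cons, List.sum_cons, ih, List.count_cons]
    by_cases hx : x = i
    · simp [hx, Nat.mul_add, Nat.add_comm]
    · simp [hx]

lemma pv_count_pairs_occ (occ : List Int) (hnd : occ.Nodup) (i j : Int) (hij : i ≠ j) :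
    ((occ.flatMap (fun a => (occ.filter (fun b => b ≠ a)).map (fun b => (a, b)))).count (i, j)) =
      (if i ∈ occ ∧ j ∈ occ then 1 else 0) := by
  rw [List.count_flatMap]
  have hmap : (occ.map (List.count (i, j) ∘ fun a => (occ.filter (fun b => b ≠ a)).map (fun b => (a, b))))
      = occ.map (fun a => if a = i then ((occ.filter (fun b => b ≠ i)).count j) else 0) := by
    apply List.map_congr_left
    intro a _
    simp only [Function.comp]
    rw [pv_count_pair_map]
    by_cases hai : a = i
    · subst hai; simp
    · simp [hai]
  rw [hmap, pv_sum_ite_count]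
  by_cases hi : i ∈ occ
  · rw [List.count_eq_one_of_mem hnd hi, Nat.mul_one]
    by_cases hj : j ∈ occ
    · have hcf : (occ.filter (fun b => b ≠ i)).count j = occ.count j :=
        List.count_filter (by simp [Ne.symm hij])
      rw [hcf, List.count_eq_one_of_mem hnd hj]
      simp [hi, hj]
    · have hnm : j ∉ occ.filter (fun b => b ≠ i) := fun hmem => hj (List.mem_of_mem_filter hmem)
      rw [List.count_eq_zero_of_not_mem hnm]
      simp [hj]
  · rw [List.count_eq_zero_of_not_mem hi]
    simp [hi]

lemma pv_sum_indicator {α : Type} (l : List α) (p : α → Bool) :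
    (l.map (fun x => if p x then 1 else 0)).sum = l.countP p := by
  induction l with
  | nil => rfl
  | cons x xs ih => by_cases h : p x <;> simp [ih, h, Nat.add_comm]

-- THE KEY LEMMA: B's accumulated count equals A's intersection size
lemma pv_counts_eq_inter (mc : List (List Int)) (k1 k2 : Nat)
    (hk1 : k1 < mc.length) (hk2 : k2 < mc.length) (hne : k1 ≠ k2) :
    (pvAltCounts (pvAltIndex (pvAltSets mc))).getD ((k1 : Int), (k2 : Int)) 0 =
      PySem.Set.len (PySem.Set.inter (PySem.Set.ofList mc[k1]) (PySem.Set.ofList mc[k2])) := by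
  have hki : ((k1 : Int)) ≠ ((k2 : Int)) := fun h => hne (by exact_mod_cast h)
  rw [pv_counts_getD, List.count_flatMap]
  rw [PySem.Dict.values_eq_map_keys _ (pv_index_keys_nodup mc) []]
  rw [List.map_map]
  have hmap : ∀ e ∈ (pvAltIndex (pvAltSets mc)).keys,
      ((List.count ((k1 : Int), (k2 : Int)) ∘ fun occ => occ.flatMap (fun a => (occ.filter (fun b => b ≠ a)).map (fun b => (a, b)))) ∘
        fun k => (pvAltIndex (pvAltSets mc)).getD k []) e
        = (fun e => if ((PySem.Set.ofList mc[k1]).contains e && (PySem.Set.ofList mc[k2]).contains e) then 1 else 0) e := by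
    intro e _
    simp only [Function.comp, pv_index_getD]
    rw [pv_count_pairs_occ _ (pv_occ_nodup mc e) _ _ hki]
    by_cases h1 : e ∈ PySem.Set.ofList mc[k1] <;> by_cases h2 : e ∈ PySem.Set.ofList mc[k2] <;>
      simp [pv_mem_occ mc e k1 hk1, pv_mem_occ mc e k2 hk2, h1, h2]
  rw [List.map_congr_left hmap, pv_sum_indicator, List.countP_eq_length_filter]
  have hperm : ((pvAltIndex (pvAltSets mc)).keys.filter
        (fun e => ((PySem.Set.ofList mc[k1]).contains e && (PySem.Set.ofList mc[k2]).contains e))).Perm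
      ((PySem.Set.ofList mc[k1]).filter (fun x => (PySem.Set.ofList mc[k2]).contains x)) := by
    rw [List.perm_ext_iff_of_nodup ((pv_index_keys_nodup mc).filter _) ((PySem.Set.nodup_ofList _).filter _)]
    intro e
    simp only [List.mem_filter, Bool.and_eq_true]
    constructor
    · rintro ⟨-, hm1, hm2⟩; exact ⟨List.contains_iff_mem.1 hm1, hm2⟩
    · rintro ⟨hm1, hm2⟩
      exact ⟨(pv_mem_index_keys mc e).2 ⟨k1, hk1, hm1⟩, List.contains_iff_mem.2 hm1, hm2⟩
  rw [hperm.length_eq]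
  simp [PySem.Set.len, PySem.Set.inter]

-- the two generated (unsorted) pair lists coincide
lemma pv_lists_eq (mc : List (List Int)) :
    (mc.foldl (fun C c1 =>
      mc.foldl (fun C c2 =>
        if c1 ≠ c2 then
          let n := PySem.Set.len (PySem.Set.inter (PySem.Set.ofList c1) (PySem.Set.ofList c2))
          if n > 0 then C ++ [(c1, c2, n)] else C
        else C) C) ([] : List (List Int × List Int × Int))) =
    pvAltEmit mc (pvAltCounts (pvAltIndex (pvAltSets mc))) := by
  have hA : (mc.foldl (fun C c1 =>
      mc.foldl (fun C c2 =>
        if c1 ≠ c2 then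
          let n := PySem.Set.len (PySem.Set.inter (PySem.Set.ofList c1) (PySem.Set.ofList c2))
          if n > 0 then C ++ [(c1, c2, n)] else C
        else C) C) ([] : List (List Int × List Int × Int)))
      = mc.flatMap (fun c1 => mc.flatMap (pvFA c1)) := by
    rw [PySem.List.foldl_congr_mem mc _ (fun C c1 => C ++ mc.flatMap (pvFA c1)) [] ?_]
    · rw [PySem.List.foldl_append_eq_flatMap]; simp
    · intro C c1 _
      rw [PySem.List.foldl_congr_mem mc _ (fun C c2 => C ++ pvFA c1 c2) C ?_]
      · rw [PySem.List.foldl_append_eq_flatMap]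
      · intro C' c2 _
        by_cases h : c1 = c2
        · simp [pvFA, h]
        · simp only [pvFA, if_pos h]
          split_ifs <;> simp
  have hB : pvAltEmit mc (pvAltCounts (pvAltIndex (pvAltSets mc)))
      = (PySem.List.enumerate mc).flatMap (fun p1 => (PySem.List.enumerate mc).flatMap (pvFB mc p1)) := by
    unfold pvAltEmit
    rw [PySem.List.foldl_congr_mem _ _ (fun C p1 => C ++ (PySem.List.enumerate mc).flatMap (pvFB mc p1)) [] ?_]
    · rw [PySem.List.foldl_append_eq_flatMap]; simp
    · intro C p1 _
      rw [PySem.List.foldl_congr_mem _ _ (fun C p2 => C ++ pvFB mc p1 p2) C ?_]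
      · rw [PySem.List.foldl_append_eq_flatMap]
      · intro C' p2 _
        by_cases h : p1.2 = p2.2
        · simp [pvFB, h]
        · simp only [pvFB, if_pos h]
          split_ifs <;> simp
  rw [hA, hB]
  rw [pv_flatMap_enum mc (fun c1 => mc.flatMap (pvFA c1))]
  apply List.flatMap_congr
  intro p1 hp1
  rcases (PySem.List.mem_enumerate_iff _ _ _).1 hp1 with ⟨k1, hk1, rfl⟩
  rw [pv_flatMap_enum mc (fun c2 => pvFA (0 + (k1 : Int), mc[k1]).2 c2)]
  apply List.flatMap_congr
  intro p2 hp2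
  rcases (PySem.List.mem_enumerate_iff _ _ _).1 hp2 with ⟨k2, hk2, rfl⟩
  simp only [pvFA, pvFB, zero_add]
  by_cases h : mc[k1] = mc[k2]
  · simp [h]
  · have hne : k1 ≠ k2 := fun hk => h (by subst hk; rfl)
    rw [pv_counts_eq_inter mc k1 k2 hk1 hk2 hne]

-- ===== VERDICT (by name: the statement is the Claim_ definition above) =====
theorem create_graph_of_cliques_spec : Claim_equal_create_graph_of_cliques := by
  intro mc _
  show _ = _
  unfold create_graph_of_cliques create_graph_of_cliques_alt
  rw [pv_lists_eq]
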